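-- pv_equiv track=rewrite | github.com/abenjas69/Extracao_switches | ideia6_features.py | _merge_by_neighbor_port
-- ===== SOURCE A (Python) =====
-- from typing import Any, Dict, Iterable, List, Optional, Sequence, Set, Tuple, Union
-- from typing import Any, Dict, List, Tuple
--
-- def _merge_by_neighbor_port(rows: List[Dict[str, str]]) -> Dict[Tuple[str, str], Dict[str, str]]:
--     """
--     Junta entradas do mesmo (neighbor, neighbor_if), preenchendo local_if se faltar.
--     Retorna dict key->row para facilitar diffs.
--     """
--     merged: Dict[Tuple[str, str], Dict[str, str]] = {}
--     for r in rows: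
--         k = (r["neighbor"].strip().lower(), r["neighbor_if"].strip().lower())
--         if k not in merged:
--             merged[k] = dict(r)
--         else:
--             # preferir local_if preenchido
--             if not merged[k].get("local_if") and r.get("local_if"):
--                 merged[k]["local_if"] = r["local_if"]
--     return merged
-- ===== SOURCE B (Python) =====
-- def _merge_by_neighbor_port(rows):
--     # Group-then-reduce: one grouping pass, then pick each group's merged row.
--     groups = {}
--     for r in rows:
--         k = (r["neighbor"].strip().lower(), r["neighbor_if"].strip().lower())
--         groups.setdefault(k, []).append(r)
--     out = {}
--     for k, g in groups.items():
--         base = dict(g[0])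
--         if not base.get("local_if"):
--             for r in g[1:]:
--                 if r.get("local_if"):
--                     base["local_if"] = r["local_if"]
--                     break
--         out[k] = base
--     return out
-- ===== Notes on version B (the rewrite author's own statement) =====
-- stated objective: alternative
-- what changed: Replaces A's incremental dict-update (insert-or-patch the merged entry row by row) by a two-phase group-then-reduce: one pass building key->list-of-rows with setdefault, then per group copy the first row and scan the rest for the first truthy local_if. Pre_ excludes rows missing the 'neighbor' or 'neighbor_if' key, where A raises KeyError (B raises there too).
import Mathlib
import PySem

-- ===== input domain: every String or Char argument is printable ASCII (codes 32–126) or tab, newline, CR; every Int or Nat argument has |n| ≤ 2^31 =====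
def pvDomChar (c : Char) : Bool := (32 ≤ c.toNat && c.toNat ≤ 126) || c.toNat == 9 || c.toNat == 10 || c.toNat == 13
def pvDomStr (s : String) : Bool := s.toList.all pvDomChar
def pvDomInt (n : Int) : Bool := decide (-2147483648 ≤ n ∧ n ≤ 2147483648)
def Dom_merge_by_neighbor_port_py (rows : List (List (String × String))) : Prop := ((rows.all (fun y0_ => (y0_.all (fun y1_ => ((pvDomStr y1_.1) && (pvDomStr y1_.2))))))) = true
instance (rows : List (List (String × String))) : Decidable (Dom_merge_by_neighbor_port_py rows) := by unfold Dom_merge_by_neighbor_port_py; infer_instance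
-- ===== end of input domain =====

-- B replaces A's incremental insert-or-patch merge by a group-then-reduce pass; same output, same cost.

-- ===== PORT A =====
-- shared key expression: (r["neighbor"].strip().lower(), r["neighbor_if"].strip().lower());
-- Pre_ guarantees both keys are present (Python raises KeyError otherwise), so getD's default is never used
def pvKey (r : List (String × String)) : String × String :=
  (PySem.Str.lower (PySem.Str.strip ((PySem.Dict.mk r).getD "neighbor" "")),
   PySem.Str.lower (PySem.Str.strip ((PySem.Dict.mk r).getD "neighbor_if" "")))

-- one iteration of A's loop
def pvStepA (m : PySem.Dict (String × String) (PySem.Dict String String))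
    (r : List (String × String)) : PySem.Dict (String × String) (PySem.Dict String String) :=
  let k := pvKey r
  match m.get? k with
  | none => m.insert k (PySem.Dict.mk r)
  | some base =>
      if (base.getD "local_if" "" == "") && ((PySem.Dict.mk r).getD "local_if" "" != "") then
        m.insert k (base.insert "local_if" ((PySem.Dict.mk r).getD "local_if" ""))
      else m

def merge_by_neighbor_port_py (rows : List (List (String × String))) :
    List (String × String × List (String × String)) :=
  ((rows.foldl pvStepA PySem.Dict.empty).items).map (fun p => (p.1.1, p.1.2, p.2.items))

-- ===== PORT B =====
-- grouping pass: groups.setdefault(k, []).append(r)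
def pvStepB (g : PySem.Dict (String × String) (List (List (String × String))))
    (r : List (String × String)) : PySem.Dict (String × String) (List (List (String × String))) :=
  g.modify (pvKey r) [] (· ++ [r])

-- for r in g[1:]: if r.get('local_if'): base['local_if'] = r['local_if']; break
def pvFill (base : PySem.Dict String String) (rest : List (List (String × String))) :
    PySem.Dict String String :=
  match rest with
  | [] => base
  | r :: rs =>
      if (PySem.Dict.mk r).getD "local_if" "" != "" then
        base.insert "local_if" ((PySem.Dict.mk r).getD "local_if" "")
      else pvFill base rs

-- base = dict(g[0]); fill only if base.get('local_if') is falsy ([] is unreachable: every group is nonempty)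
def pvReduce (g : List (List (String × String))) : PySem.Dict String String :=
  match g with
  | [] => PySem.Dict.empty
  | b :: rest =>
      let base := PySem.Dict.mk b
      if base.getD "local_if" "" != "" then base else pvFill base rest

def merge_by_neighbor_port_py_alt (rows : List (List (String × String))) :
    List (String × String × List (String × String)) :=
  ((rows.foldl pvStepB PySem.Dict.empty).items).map (fun p => (p.1.1, p.1.2, (pvReduce p.2).items))

-- ===== PRECONDITION & SPEC =====
-- Pre_ excludes exactly the rows on which Python's r["neighbor"] / r["neighbor_if"] raises KeyError
def Pre_merge_by_neighbor_port_py (rows : List (List (String × String))) : Prop :=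
  ∀ r ∈ rows, (PySem.Dict.mk r).contains "neighbor" = true ∧ (PySem.Dict.mk r).contains "neighbor_if" = true
instance (rows : List (List (String × String))) : Decidable (Pre_merge_by_neighbor_port_py rows) := by
  unfold Pre_merge_by_neighbor_port_py; infer_instance

def pvWitness_merge_by_neighbor_port_py : (List (List (String × String))) :=
  [[("neighbor", " A "), ("neighbor_if", "1"), ("local_if", "")],
   [("neighbor", "a"), ("neighbor_if", "1"), ("local_if", "e0")]]

def Spec_merge_by_neighbor_port_py (rows : List (List (String × String))) (out : List (String × String × List (String × String))) : Prop := out = merge_by_neighbor_port_py_alt rows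
instance (rows : List (List (String × String))) (out : List (String × String × List (String × String))) : Decidable (Spec_merge_by_neighbor_port_py rows out) := by unfold Spec_merge_by_neighbor_port_py; infer_instance

-- ===== CLAIM (what is proved, stated in full; the proofs are below) =====
def Claim_equal_merge_by_neighbor_port_py : Prop := ∀ (rows : List (List (String × String))), Dom_merge_by_neighbor_port_py rows → Pre_merge_by_neighbor_port_py rows → Spec_merge_by_neighbor_port_py rows (merge_by_neighbor_port_py rows)

-- ===== LEMMAS AND PROOFS =====

-- view of B's grouping dict as A's merged dict: reduce every group in place
def pvMapRed (g : PySem.Dict (String × String) (List (List (String × String)))) :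
    PySem.Dict (String × String) (PySem.Dict String String) :=
  PySem.Dict.mk (g.items.map (fun p => (p.1, pvReduce p.2)))

theorem pvMapRed_get? (g : PySem.Dict (String × String) (List (List (String × String))))
    (k : String × String) : (pvMapRed g).get? k = (g.get? k).map pvReduce := by
  obtain ⟨l⟩ := g
  induction l with
  | nil => rfl
  | cons p t ih =>
      obtain ⟨pk, pv⟩ := p
      show (PySem.Dict.mk ((pk, pvReduce pv) :: t.map (fun p => (p.1, pvReduce p.2)))).get? k
        = Option.map pvReduce ((PySem.Dict.mk ((pk, pv) :: t)).get? k)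
      rw [PySem.Dict.get?_mk_cons, PySem.Dict.get?_mk_cons]
      by_cases h : (pk == k) = true
      · simp [h]
      · simpa [h] using ih

theorem pvMapRed_contains (g : PySem.Dict (String × String) (List (List (String × String))))
    (k : String × String) : (pvMapRed g).contains k = g.contains k := by
  rw [PySem.Dict.contains_eq_isSome_get?, PySem.Dict.contains_eq_isSome_get?, pvMapRed_get?]
  cases g.get? k <;> rfl

theorem pvReduce_single (r : List (String × String)) : pvReduce [r] = PySem.Dict.mk r := by
  simp only [pvReduce, pvFill]; split <;> rfl

-- the reduce of a group extended by one row is exactly A's patch of the reduce of the group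
theorem pvFill_append (b0 : PySem.Dict String String) (rest : List (List (String × String)))
    (r : List (String × String)) (hb : b0.getD "local_if" "" = "") :
    pvFill b0 (rest ++ [r]) =
      (if ((pvFill b0 rest).getD "local_if" "" == "") && ((PySem.Dict.mk r).getD "local_if" "" != "") then
        (pvFill b0 rest).insert "local_if" ((PySem.Dict.mk r).getD "local_if" "")
      else pvFill b0 rest) := by
  induction rest with
  | nil => simp [pvFill, hb]
  | cons x xs ih =>
      by_cases hx : ((PySem.Dict.mk x).getD "local_if" "" != "") = true
      · have hgd : ((b0.insert "local_if" ((PySem.Dict.mk x).getD "local_if" "")).getD "local_if" ""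
            == "") = false := by
          rw [PySem.Dict.getD_insert_self]
          simpa using hx
        simp [pvFill, hx]
        intro h1 _
        exact absurd h1 (by simpa using hx)
      · simp only [Bool.not_eq_true] at hx
        simp only [pvFill, List.cons_append, hx, Bool.false_eq_true, if_false]
        exact ih

theorem pvReduce_append (b : List (String × String)) (rest : List (List (String × String)))
    (r : List (String × String)) :
    pvReduce ((b :: rest) ++ [r]) =
      (if ((pvReduce (b :: rest)).getD "local_if" "" == "")
          && ((PySem.Dict.mk r).getD "local_if" "" != "") then
        (pvReduce (b :: rest)).insert "local_if" ((PySem.Dict.mk r).getD "local_if" "")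
      else pvReduce (b :: rest)) := by
  by_cases hb : ((PySem.Dict.mk b).getD "local_if" "" != "") = true
  · have hb' : (((PySem.Dict.mk b).getD "local_if" "") == "") = false := by simpa using hb
    simp [pvReduce, hb, hb']
  · simp only [Bool.not_eq_true, bne_eq_false_iff_eq] at hb
    have hred : pvReduce (b :: rest) = pvFill (PySem.Dict.mk b) rest := by
      simp [pvReduce, hb]
    have hred' : pvReduce ((b :: rest) ++ [r]) = pvFill (PySem.Dict.mk b) (rest ++ [r]) := by
      simp [pvReduce, hb]
    rw [hred', hred]
    exact pvFill_append _ rest r hb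

-- one loop step commutes with the reduce view
-- per-entry fact used in the unchanged-branch of pvStep_comm
theorem pvRedRepl (k : String × String) (V W : List (List (String × String)))
    (p : (String × String) × List (List (String × String)))
    (hred : pvReduce V = pvReduce W) (hp : p.1 = k → p.2 = W) :
    ((fun q : (String × String) × List (List (String × String)) => (q.1, pvReduce q.2)) ∘
      (fun q : (String × String) × List (List (String × String)) =>
        if (q.1 == k) = true then (k, V) else q)) p = (p.1, pvReduce p.2) := by
  obtain ⟨pk, pv⟩ := p
  by_cases h : (pk == k) = true
  · have h' : pk = k := by simpa using h
    have h2 : pv = W := hp h'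
    subst h2; subst h'
    simp [hred]
  · simp [Function.comp, h]

set_option maxHeartbeats 1000000 in
theorem pvStep_comm (g : PySem.Dict (String × String) (List (List (String × String))))
    (r : List (String × String)) (hnd : g.keys.Nodup) (hne : ∀ v ∈ g.values, v ≠ []) :
    pvStepA (pvMapRed g) r = pvMapRed (pvStepB g r) := by
  set k := pvKey r with hk
  cases hg : g.get? k with
  | none =>
      have hc : g.contains k = false := by
        rw [PySem.Dict.contains_eq_isSome_get?, hg]; rfl
      have hcm : (pvMapRed g).contains k = false := by rw [pvMapRed_contains]; exact hc
      have hgm : (pvMapRed g).get? k = none := by rw [pvMapRed_get?, hg]; rfl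
      simp only [pvStepA, pvStepB, PySem.Dict.modify, ← hk, hgm]
      clear_value k
      have hgd : g.getD k [] = [] := by rw [PySem.Dict.getD_eq_get?_getD, hg]; rfl
      apply PySem.Dict.ext
      rw [PySem.Dict.items_insert_of_not_contains _ _ hcm, hgd]
      simp only [pvMapRed,
        PySem.Dict.items_insert_of_not_contains _ _ hc, List.map_append]
      simp [pvReduce_single]
  | some l =>
      have hmem : (k, l) ∈ g.items := PySem.Dict.mem_items_of_get?_eq_some _ hg
      have hlne : l ≠ [] := hne l (List.mem_map_of_mem hmem)
      obtain ⟨b, rest, rfl⟩ : ∃ b t, l = b :: t := by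
        cases l with | nil => exact absurd rfl hlne | cons b t => exact ⟨b, t, rfl⟩
      have hc : g.contains k = true := by
        rw [PySem.Dict.contains_eq_isSome_get?, hg]; rfl
      have hcm : (pvMapRed g).contains k = true := by rw [pvMapRed_contains]; exact hc
      have hgm : (pvMapRed g).get? k = some (pvReduce (b :: rest)) := by
        rw [pvMapRed_get?, hg]; rfl
      have hgd : g.getD k [] = b :: rest := by rw [PySem.Dict.getD_eq_get?_getD, hg]; rfl
      simp only [pvStepA, pvStepB, PySem.Dict.modify, ← hk, hgm, hgd]
      have hra := pvReduce_append b rest r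
      rw [List.cons_append] at hra
      by_cases hcond : (((pvReduce (b :: rest)).getD "local_if" "" == "")
          && ((PySem.Dict.mk r).getD "local_if" "" != "")) = true
      · rw [if_pos hcond]
        apply PySem.Dict.ext
        rw [PySem.Dict.items_insert_of_contains _ _ hcm]
        simp only [pvMapRed, PySem.Dict.items_insert_of_contains _ _ hc, List.map_map]
        apply List.map_congr_left
        intro p _
        by_cases hp : (p.1 == k) = true <;>
          simp [Function.comp, hp, hra, hcond]
      · rw [if_neg hcond]
        apply PySem.Dict.ext
        simp only [pvMapRed, PySem.Dict.items_insert_of_contains _ _ hc, List.map_map]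
        symm
        apply List.map_congr_left
        intro p hpmem
        refine pvRedRepl k (b :: (rest ++ [r])) (b :: rest) p ?_ ?_
        · rw [hra, if_neg hcond]
        intro hpk
        have hgp : g.get? p.1 = some p.2 := PySem.Dict.get?_of_mem_items _ (by
          cases p; exact hpmem) hnd
        rw [hpk, hg] at hgp
        exact Option.some.inj hgp.symm

-- invariants of B's grouping fold
theorem pvStepB_nodup (g : PySem.Dict (String × String) (List (List (String × String))))
    (r : List (String × String)) (h : g.keys.Nodup) : (pvStepB g r).keys.Nodup :=
  PySem.Dict.nodup_keys_insert _ _ _ h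

theorem pvStepB_ne (g : PySem.Dict (String × String) (List (List (String × String))))
    (r : List (String × String)) (h : ∀ v ∈ g.values, v ≠ []) :
    ∀ v ∈ (pvStepB g r).values, v ≠ [] := by
  intro v hv
  rcases PySem.Dict.mem_values_insert _ _ _ _ hv with h1 | h1
  · subst h1; simp
  · exact h v h1

theorem pvFold_comm (rows : List (List (String × String)))
    (g : PySem.Dict (String × String) (List (List (String × String))))
    (hnd : g.keys.Nodup) (hne : ∀ v ∈ g.values, v ≠ []) :
    rows.foldl pvStepA (pvMapRed g) = pvMapRed (rows.foldl pvStepB g) := by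
  induction rows generalizing g with
  | nil => rfl
  | cons r rs ih =>
      simp only [List.foldl_cons, pvStep_comm g r hnd hne]
      exact ih _ (pvStepB_nodup g r hnd) (pvStepB_ne g r hne)

-- ===== VERDICT (by name: the statement is the Claim_ definition above) =====
theorem merge_by_neighbor_port_py_spec : Claim_equal_merge_by_neighbor_port_py := by
  intro rows _ _
  show _ = _
  have hemp : pvMapRed PySem.Dict.empty = PySem.Dict.empty := rfl
  unfold merge_by_neighbor_port_py merge_by_neighbor_port_py_alt
  rw [← hemp, pvFold_comm rows PySem.Dict.empty (by simp)
    (by intro v hv; simp [PySem.Dict.empty, PySem.Dict.values] at hv)]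
  simp [pvMapRed, List.map_map, Function.comp]
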